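-- pv_equiv track=rewrite | github.com/Jack0karev/konoha | а еще что-то осталось.py | fast_algo
-- ===== SOURCE A (Python) =====
-- def fast_algo(A,B,C,S):
--     q = 0
--     C = set(C)
--     for i in range(len(A)):
--         for j in range(len(B)):
--             if S - A[i] - B[j] in C:
--                 q += 1
--     return q
-- ===== SOURCE B (Python) =====
-- def fast_algo(A, B, C, S):
--     # Count pairs (i,j) with S - A[i] - B[j] in set(C) by multiplying value
--     # frequencies instead of scanning every index pair: sum over distinct c in C
--     # and distinct a in A of count_A(a) * count_B(S - c - a).
--     cntA = {}
--     for a in A: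
--         cntA[a] = cntA.get(a, 0) + 1
--     cntB = {}
--     for b in B:
--         cntB[b] = cntB.get(b, 0) + 1
--     q = 0
--     for c in set(C):
--         for a, na in cntA.items():
--             q += na * cntB.get(S - c - a, 0)
--     return q
-- ===== Notes on version B (the rewrite author's own statement) =====
-- stated objective: alternative
-- what changed: Replaces the scan over all index pairs (i,j) with frequency counting: build Counter-style dicts for A and B once, then sum count_A(a)*count_B(S-c-a) over distinct values a and distinct c in C.
import Mathlib
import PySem

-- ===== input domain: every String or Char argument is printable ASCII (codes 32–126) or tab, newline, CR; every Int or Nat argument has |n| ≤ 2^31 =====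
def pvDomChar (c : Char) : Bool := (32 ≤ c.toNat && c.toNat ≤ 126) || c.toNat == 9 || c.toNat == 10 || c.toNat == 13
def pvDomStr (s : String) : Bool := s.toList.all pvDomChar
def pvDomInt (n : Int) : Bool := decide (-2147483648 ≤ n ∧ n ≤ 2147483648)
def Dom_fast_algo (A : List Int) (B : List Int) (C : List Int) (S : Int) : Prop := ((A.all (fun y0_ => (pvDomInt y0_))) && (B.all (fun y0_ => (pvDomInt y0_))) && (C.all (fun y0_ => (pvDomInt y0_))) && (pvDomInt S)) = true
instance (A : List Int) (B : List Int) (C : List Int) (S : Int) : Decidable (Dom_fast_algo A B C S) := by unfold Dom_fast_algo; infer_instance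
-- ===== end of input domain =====

-- B replaces A's scan over all index pairs (i,j) with frequency counters built once,
-- summing count_A(a) * count_B(S-c-a) over distinct values (objective: alternative algorithm).

-- ===== PORT A =====
def fast_algo (A : List Int) (B : List Int) (C : List Int) (S : Int) : Int :=
  let q : Int := 0
  let Cs : PySem.Set Int := PySem.Set.ofList C
  (PySem.List.pyRange 0 (PySem.List.len A) 1).foldl (fun q i =>
    (PySem.List.pyRange 0 (PySem.List.len B) 1).foldl (fun q j =>
      if PySem.Set.contains Cs (S - PySem.List.pyGetD A i 0 - PySem.List.pyGetD B j 0)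
      then q + 1 else q) q) q

-- ===== PORT B =====
def fast_algo_alt (A : List Int) (B : List Int) (C : List Int) (S : Int) : Int :=
  let cntA : PySem.Dict Int Int := A.foldl (fun d a => d.modify a 0 (· + 1)) PySem.Dict.empty
  let cntB : PySem.Dict Int Int := B.foldl (fun d b => d.modify b 0 (· + 1)) PySem.Dict.empty
  (PySem.Set.ofList C).foldl (fun q c =>
    cntA.items.foldl (fun q p => q + p.2 * cntB.getD (S - c - p.1) 0) q) 0

-- ===== PRECONDITION & SPEC =====
def Spec_fast_algo (A : List Int) (B : List Int) (C : List Int) (S : Int) (out : Int) : Prop := out = fast_algo_alt A B C S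
instance (A : List Int) (B : List Int) (C : List Int) (S : Int) (out : Int) : Decidable (Spec_fast_algo A B C S out) := by unfold Spec_fast_algo; infer_instance

-- ===== CLAIM (what is proved, stated in full; the proofs are below) =====
def Claim_equal_fast_algo : Prop := ∀ (A : List Int) (B : List Int) (C : List Int) (S : Int), Dom_fast_algo A B C S → Spec_fast_algo A B C S (fast_algo A B C S)

-- ===== LEMMAS AND PROOFS =====

-- A's double index loop computes Σ_{a ∈ A} #{b ∈ B | S-a-b ∈ set(C)}.
theorem fast_algo_eq_sum (A B C : List Int) (S : Int) :
    fast_algo A B C S =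
      (A.map (fun a => (B.countP (fun b => PySem.Set.contains (PySem.Set.ofList C) (S - a - b)) : Int))).sum := by
  unfold fast_algo
  rw [PySem.List.foldl_pyRange_zero_pyGetD A 0
      (fun q a => List.foldl (fun q j =>
        if PySem.Set.contains (PySem.Set.ofList C) (S - a - PySem.List.pyGetD B j 0) then q + 1 else q)
        q (PySem.List.pyRange 0 (PySem.List.len B) 1)) 0]
  have hinner : ∀ (a q : Int),
      List.foldl (fun q j =>
        if PySem.Set.contains (PySem.Set.ofList C) (S - a - PySem.List.pyGetD B j 0) then q + 1 else q)
        q (PySem.List.pyRange 0 (PySem.List.len B) 1)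
      = q + (B.countP (fun b => PySem.Set.contains (PySem.Set.ofList C) (S - a - b)) : Int) := by
    intro a q
    rw [PySem.List.foldl_pyRange_zero_pyGetD B 0
        (fun q b => if PySem.Set.contains (PySem.Set.ofList C) (S - a - b) then q + 1 else q) q]
    exact PySem.List.foldl_if_add_one _ _ _
  refine Eq.trans (List.foldl_ext _ (fun (q a : Int) =>
        q + (B.countP (fun b => PySem.Set.contains (PySem.Set.ofList C) (S - a - b)) : Int)) 0
      (fun q a _ => hinner a q)) ?_
  rw [PySem.List.foldl_add (g := fun a => (B.countP (fun b => PySem.Set.contains (PySem.Set.ofList C) (S - a - b)) : Int))]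
  simp

-- Σ over the counter's items of n * h(k) equals Σ over A of h(a).
theorem counter_items_sum (A : List Int) (h : Int → Int) :
    ((PySem.Dict.counter A).items.map (fun p => p.2 * h p.1)).sum = (A.map h).sum := by
  have hval : ∀ p ∈ (PySem.Dict.counter A).items, p.2 * h p.1 = (A.count p.1 : Int) * h p.1 := by
    intro p hp
    have h1 : (PySem.Dict.counter A).get? p.1 = some p.2 :=
      PySem.Dict.get?_of_mem_items _ (by simpa using hp) (PySem.Dict.nodup_keys_counter A)
    have h2 : (PySem.Dict.counter A).getD p.1 0 = p.2 :=
      PySem.Dict.getD_of_get?_eq_some _ 0 h1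
    rw [← h2, PySem.Dict.getD_counter]
  rw [List.map_congr_left hval]
  have hkeys : (PySem.Dict.counter A).items.map Prod.fst = PySem.Set.ofList A := by
    have : (PySem.Dict.counter A).keys = (PySem.Dict.counter A).items.map Prod.fst := rfl
    rw [← this, PySem.Dict.keys_counter]
  have hmm : (PySem.Dict.counter A).items.map (fun p => (A.count p.1 : Int) * h p.1)
       = ((PySem.Dict.counter A).items.map Prod.fst).map (fun k => (A.count k : Int) * h k) := by
    rw [List.map_map]; rfl
  rw [hmm, hkeys]
  rw [← List.sum_toFinset _ (PySem.Set.nodup_ofList A)]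
  have hfs : (PySem.Set.ofList A).toFinset = A.toFinset := by
    ext x; simp [List.mem_toFinset, PySem.Set.mem_ofList]
  rw [hfs, Finset.sum_list_map_count]
  simp [mul_comm]

-- B computes Σ_{c ∈ set(C)} Σ_{a ∈ A} count_B(S-c-a).
theorem fast_algo_alt_eq_sum (A B C : List Int) (S : Int) :
    fast_algo_alt A B C S =
      ((PySem.Set.ofList C).map (fun c => (A.map (fun a => (B.count (S - c - a) : Int))).sum)).sum := by
  unfold fast_algo_alt
  rw [← PySem.Dict.counter_eq_foldl A, ← PySem.Dict.counter_eq_foldl B]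
  have hinner : ∀ (c q : Int),
      (PySem.Dict.counter A).items.foldl
        (fun q p => q + p.2 * (PySem.Dict.counter B).getD (S - c - p.1) 0) q
      = q + (A.map (fun a => (B.count (S - c - a) : Int))).sum := by
    intro c q
    rw [PySem.List.foldl_add (g := fun p : Int × Int => p.2 * (PySem.Dict.counter B).getD (S - c - p.1) 0)]
    have hg : ((PySem.Dict.counter A).items.map
        (fun p : Int × Int => p.2 * (PySem.Dict.counter B).getD (S - c - p.1) 0)).sum
        = ((PySem.Dict.counter A).items.map
        (fun p : Int × Int => p.2 * (B.count (S - c - p.1) : Int))).sum := by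
      simp [PySem.Dict.getD_counter]
    rw [hg, counter_items_sum A (fun a => (B.count (S - c - a) : Int))]
  refine Eq.trans (List.foldl_ext _ (fun (q c : Int) =>
      q + (A.map (fun a => (B.count (S - c - a) : Int))).sum) 0
      (fun q c _ => hinner c q)) ?_
  rw [PySem.List.foldl_add (g := fun c => (A.map (fun a => (B.count (S - c - a) : Int))).sum)]
  simp

-- a 0/1 sum over a duplicate-free list is a membership test
theorem sum_ite_mem (Cs : List Int) (hnd : Cs.Nodup) (x : Int) :
    (Cs.map (fun c => if c = x then (1:Int) else 0)).sum = if x ∈ Cs then 1 else 0 := by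
  induction Cs with
  | nil => simp
  | cons c cs ih =>
    have hnotmem : c ∉ cs := (List.nodup_cons.mp hnd).1
    have ih' := ih (List.nodup_cons.mp hnd).2
    simp only [List.map_cons, List.sum_cons, List.mem_cons, ih']
    by_cases hcx : c = x
    · subst hcx
      simp [hnotmem]
    · simp [hcx, Ne.symm hcx]

-- Σ_{c ∈ Cs} count_B(S-c-a) = #{b ∈ B | S-a-b ∈ Cs}, for duplicate-free Cs
theorem step2 (Cs B : List Int) (hnd : Cs.Nodup) (a S : Int) :
    (Cs.map (fun c => (B.count (S - c - a) : Int))).sum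
    = (B.countP (fun b => Cs.contains (S - a - b)) : Int) := by
  induction B with
  | nil => simp
  | cons b B' ih =>
    have hmap : ∀ c ∈ Cs, ((b :: B').count (S - c - a) : Int)
        = (B'.count (S - c - a) : Int) + (if c = S - a - b then (1:Int) else 0) := by
      intro c _
      rw [List.count_cons]
      push_cast
      congr 1
      by_cases h : b = S - c - a
      · rw [if_pos (by exact beq_iff_eq.mpr h), if_pos (by omega)]
      · rw [if_neg (by simpa using h), if_neg (by omega)]
    rw [List.map_congr_left hmap, PySem.List.sum_map_add_int, ih,
        sum_ite_mem Cs hnd (S - a - b), List.countP_cons]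
    by_cases hmem : (S - a - b) ∈ Cs
    · simp [hmem]
    · simp [hmem]

theorem list_sum_comm (l m : List Int) (f : Int → Int → Int) :
    (l.map (fun x => (m.map (f x)).sum)).sum = (m.map (fun y => (l.map (fun x => f x y)).sum)).sum := by
  induction l with
  | nil => simp
  | cons x l ih =>
    simp only [List.map_cons, List.sum_cons, ih, PySem.List.sum_map_add_int]

theorem sums_agree (A B C : List Int) (S : Int) :
    ((PySem.Set.ofList C).map (fun c => (A.map (fun a => (B.count (S - c - a) : Int))).sum)).sum
      = (A.map (fun a => (B.countP (fun b => PySem.Set.contains (PySem.Set.ofList C) (S - a - b)) : Int))).sum := by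
  rw [list_sum_comm (PySem.Set.ofList C) A (fun c a => (B.count (S - c - a) : Int))]
  exact congrArg List.sum (List.map_congr_left
    (fun a _ => step2 (PySem.Set.ofList C) B (PySem.Set.nodup_ofList C) a S))

-- ===== VERDICT (by name: the statement is the Claim_ definition above) =====
theorem fast_algo_spec : Claim_equal_fast_algo := by
  intro A B C S _
  unfold Spec_fast_algo
  rw [fast_algo_eq_sum, fast_algo_alt_eq_sum, sums_agree]
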